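-- pv_equiv track=rewrite | github.com/jburnford/text_as_data_colonial_office_list | extraction_instructor.py | chunk_by_department
-- ===== SOURCE A (Python) =====
-- def chunk_by_department(text: str) -> list[tuple[str, str]]:
--     """
--     Split text into chunks by department.
--     Returns list of (department_name, department_text) tuples.
--     """
--     chunks = []
--     current_dept = "Unknown"
--     current_lines = []
--
--     # Department header patterns
--     dept_keywords = [
--         "Department", "Office", "Establishment", "Council", "Bank"
--     ]
--
--     lines = text.split('\n')
--
--     for line in lines:
--         stripped = line.strip()
--
--         # Check if this is a department header
--         is_header = False
--         if stripped and not any(c.isdigit() for c in stripped[:20]) or 'l.' not in stripped: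
--             # Might be a header - check for keywords
--             if any(kw in stripped for kw in dept_keywords) or stripped.endswith('.'):
--                 # Clean up
--                 potential_dept = stripped.rstrip('.').rstrip('-').strip()
--                 if len(potential_dept) < 60 and 'l.' not in stripped:
--                     is_header = True
--                     # Save previous chunk
--                     if current_lines:
--                         chunks.append((current_dept, '\n'.join(current_lines)))
--                     current_dept = potential_dept
--                     current_lines = []
--                     continue
--
--         current_lines.append(line)
--
--     # Don't forget last chunk
--     if current_lines:
--         chunks.append((current_dept, '\n'.join(current_lines)))
--
--     return chunks
-- ===== SOURCE B (Python) =====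
-- def chunk_by_department(text: str) -> list[tuple[str, str]]:
--     """Segmentation by header positions: first compute the list of (index, name)
--     of all header lines, then emit one chunk per gap between consecutive header
--     positions by slicing the line list (no running buffer/state machine)."""
--     dept_keywords = ("Department", "Office", "Establishment", "Council", "Bank")
--
--     def header_name(line):
--         s = line.strip()
--         if (s and not any(c.isdigit() for c in s[:20])) or 'l.' not in s:
--             if any(kw in s for kw in dept_keywords) or s.endswith('.'):
--                 p = s.rstrip('.').rstrip('-').strip()
--                 if len(p) < 60 and 'l.' not in s:
--                     return p
--         return None
--
--     lines = text.split('\n')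
--     headers = [(i, d) for i, d in ((i, header_name(l)) for i, l in enumerate(lines))
--                if d is not None]
--     bounds = [(-1, "Unknown")] + headers + [(len(lines), "")]
--     out = []
--     for (i, dept), (j, _) in zip(bounds, bounds[1:]):
--         seg = lines[i + 1:j]
--         if seg:
--             out.append((dept, '\n'.join(seg)))
--     return out
-- ===== Notes on version B (the rewrite author's own statement) =====
-- stated objective: alternative
-- what changed: A's stateful single pass (running buffer + current department, flushed at each header) is replaced by a segmentation algorithm: compute the list of header positions once, then produce each chunk independently by slicing the line list between consecutive header positions; no accumulator or mutable department state crosses lines.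
import Mathlib
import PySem

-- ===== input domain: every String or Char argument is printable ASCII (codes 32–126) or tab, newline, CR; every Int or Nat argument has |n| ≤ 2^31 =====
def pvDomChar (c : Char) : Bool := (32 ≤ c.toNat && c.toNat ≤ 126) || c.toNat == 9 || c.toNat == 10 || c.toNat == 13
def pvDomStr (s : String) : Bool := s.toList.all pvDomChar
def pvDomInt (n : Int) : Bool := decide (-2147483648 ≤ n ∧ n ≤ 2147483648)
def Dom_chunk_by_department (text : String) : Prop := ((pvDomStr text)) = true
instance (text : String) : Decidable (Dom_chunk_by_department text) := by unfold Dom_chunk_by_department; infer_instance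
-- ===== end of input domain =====

-- B replaces A's stateful buffer-and-flush scan by segmentation: precompute header positions, then slice each chunk out between consecutive headers (objective: alternative).

-- ===== PORT A =====

-- exact hand port of Python s.rstrip(c) for a single character c: drop trailing copies of c
def pvRstrip1 (s : String) (c : Char) : String :=
  String.ofList ((s.toList.reverse.dropWhile (· == c)).reverse)

-- the body of A's for-loop, one step over state (chunks, current_dept, current_lines)
def pvStepA (st : List (String × String) × String × List String) (line : String) :
    List (String × String) × String × List String :=
  let chunks := st.1
  let current_dept := st.2.1
  let current_lines := st.2.2
  let dept_keywords : List String := ["Department", "Office", "Establishment", "Council", "Bank"]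
  let stripped := PySem.Str.strip line
  if ((!stripped.toList.isEmpty && !((PySem.List.slice stripped.toList none (some 20)).any PySem.Chars.isdigit)) || !(PySem.Str.isIn "l." stripped)) then
    if (dept_keywords.any (fun kw => PySem.Str.isIn kw stripped)) || PySem.Str.endswith stripped "." then
      let potential_dept := PySem.Str.strip (pvRstrip1 (pvRstrip1 stripped '.') '-')
      if decide (PySem.Str.len potential_dept < 60) && !(PySem.Str.isIn "l." stripped) then
        ((if current_lines ≠ [] then chunks ++ [(current_dept, PySem.Str.join "\n" current_lines)] else chunks),
         potential_dept, ([] : List String))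
      else (chunks, current_dept, current_lines ++ [line])
    else (chunks, current_dept, current_lines ++ [line])
  else (chunks, current_dept, current_lines ++ [line])

def chunk_by_department (text : String) : List (String × String) :=
  let lines := (PySem.Str.split? text "\n").getD []
  let st := lines.foldl pvStepA (([] : List (String × String)), "Unknown", ([] : List String))
  if st.2.2 ≠ [] then st.1 ++ [(st.2.1, PySem.Str.join "\n" st.2.2)] else st.1

-- ===== PORT B =====

def pvKws : List String := ["Department", "Office", "Establishment", "Council", "Bank"]

-- Source B's header_name: the cleaned department name if the line is a header, none otherwise
def pvHeaderName (line : String) : Option String :=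
  let s := PySem.Str.strip line
  if ((!s.toList.isEmpty && !((PySem.List.slice s.toList none (some 20)).any PySem.Chars.isdigit)) || !(PySem.Str.isIn "l." s)) then
    if (pvKws.any (fun kw => PySem.Str.isIn kw s)) || PySem.Str.endswith s "." then
      let p := PySem.Str.strip (pvRstrip1 (pvRstrip1 s '.') '-')
      if decide (PySem.Str.len p < 60) && !(PySem.Str.isIn "l." s) then some p else none
    else none
  else none

def chunk_by_department_alt (text : String) : List (String × String) :=
  let lines := (PySem.Str.split? text "\n").getD []
  let headers := (PySem.List.enumerate lines).filterMap
    (fun r => (pvHeaderName r.2).map (fun d => (r.1, d)))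
  let bounds := ((-1 : Int), "Unknown") :: headers ++ [((lines.length : Int), "")]
  (bounds.zip bounds.tail).foldl
    (fun out p =>
      let seg := PySem.List.slice lines (some (p.1.1 + 1)) (some p.2.1)
      if seg ≠ [] then out ++ [(p.1.2, PySem.Str.join "\n" seg)] else out) []

-- ===== PRECONDITION & SPEC =====
def Spec_chunk_by_department (text : String) (out : List (String × String)) : Prop := out = chunk_by_department_alt text
instance (text : String) (out : List (String × String)) : Decidable (Spec_chunk_by_department text out) := by unfold Spec_chunk_by_department; infer_instance

-- ===== CLAIM (what is proved, stated in full; the proofs are below) =====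
def Claim_equal_chunk_by_department : Prop := ∀ (text : String), Dom_chunk_by_department text → Spec_chunk_by_department text (chunk_by_department text)

-- ===== LEMMAS AND PROOFS =====

-- A's trailing flush, as a function of the final state
def pvFinal (st : List (String × String) × String × List String) : List (String × String) :=
  if st.2.2 ≠ [] then st.1 ++ [(st.2.1, PySem.Str.join "\n" st.2.2)] else st.1

-- reference grouping function both proofs are routed through
def pvGroup : List (Option String × String) → String → List String → List (String × String)
  | [], dept, buf => if buf ≠ [] then [(dept, PySem.Str.join "\n" buf)] else []
  | (some d, _) :: rest, dept, buf =>
      (if buf ≠ [] then [(dept, PySem.Str.join "\n" buf)] else []) ++ pvGroup rest d []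
  | (none, line) :: rest, dept, buf => pvGroup rest dept (buf ++ [line])

lemma pvStepA_eq (st : List (String × String) × String × List String) (line : String) :
    pvStepA st line =
      match pvHeaderName line with
      | some p => ((if st.2.2 ≠ [] then st.1 ++ [(st.2.1, PySem.Str.join "\n" st.2.2)] else st.1), p, [])
      | none => (st.1, st.2.1, st.2.2 ++ [line]) := by
  simp only [pvStepA, pvHeaderName, pvKws]
  split_ifs <;> rfl

lemma pvFold_group (lines : List String) :
    ∀ (c : List (String × String)) (d : String) (l : List String),
      pvFinal (lines.foldl pvStepA (c, d, l)) =
        c ++ pvGroup (lines.map (fun x => (pvHeaderName x, x))) d l := by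
  induction lines with
  | nil =>
      intro c d l
      simp only [List.foldl_nil, List.map_nil, pvFinal, pvGroup]
      by_cases hl : l = [] <;> simp [hl]
  | cons line rest ih =>
      intro c d l
      simp only [List.foldl_cons, List.map_cons, pvStepA_eq]
      cases h : pvHeaderName line with
      | none => simpa [pvGroup] using ih c d (l ++ [line])
      | some p =>
          simp only [pvGroup]
          by_cases hl : l = []
          · simp [hl, ih]
          · simp [hl, ih, List.append_assoc]

-- ---- B-side machinery ----

def pvHdrF : Int × String → Option (Int × String) :=
  fun r => (pvHeaderName r.2).map (fun d => (r.1, d))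

def pvBounds (lines : List String) (dept : String) : List (Int × String) :=
  (((-1 : Int), dept) :: (PySem.List.enumerate lines).filterMap pvHdrF ++ [((lines.length : Int), "")])

def pvSegOut (lines : List String) (p : (Int × String) × (Int × String)) : List (String × String) :=
  if PySem.List.slice lines (some (p.1.1 + 1)) (some p.2.1) ≠ [] then
    [(p.1.2, PySem.Str.join "\n" (PySem.List.slice lines (some (p.1.1 + 1)) (some p.2.1)))]
  else []

def pvBcore (lines : List String) (dept : String) : List (String × String) :=
  ((pvBounds lines dept).zip (pvBounds lines dept).tail).flatMap (pvSegOut lines)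

lemma pvFold_seg (lines : List String) (pairs : List ((Int × String) × (Int × String))) :
    ∀ (out : List (String × String)),
      pairs.foldl
        (fun out p =>
          let seg := PySem.List.slice lines (some (p.1.1 + 1)) (some p.2.1)
          if seg ≠ [] then out ++ [(p.1.2, PySem.Str.join "\n" seg)] else out) out
      = out ++ pairs.flatMap (pvSegOut lines) := by
  induction pairs with
  | nil => intro out; simp
  | cons p ps ih =>
      intro out
      simp only [List.foldl_cons, List.flatMap_cons, ih]
      simp only [pvSegOut]
      split_ifs <;> simp

lemma pvAlt_eq_Bcore (text : String) :
    chunk_by_department_alt text = pvBcore ((PySem.Str.split? text "\n").getD []) "Unknown" := by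
  simp only [chunk_by_department_alt, pvBcore, pvBounds, pvHdrF]
  rw [pvFold_seg]
  simp

-- shift lemma for enumerate+filterMap
lemma pvFilterMap_enum_shift (xs : List String) (s : Int) :
    (PySem.List.enumerate xs s).filterMap pvHdrF
      = ((PySem.List.enumerate xs 0).filterMap pvHdrF).map (fun p => (p.1 + s, p.2)) := by
  induction xs generalizing s with
  | nil => simp [PySem.List.enumerate_nil]
  | cons x rest ih =>
      rw [PySem.List.enumerate_cons, PySem.List.enumerate_cons, List.filterMap_cons,
        List.filterMap_cons, ih (s + 1), ih (0 + 1)]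
      cases h : pvHeaderName x with
      | none =>
          simp only [pvHdrF, h, Option.map_none, List.map_map]
          exact List.map_congr_left (fun p _ => by simp [Function.comp]; ring)
      | some d =>
          simp only [pvHdrF, h, Option.map_some, List.map_cons, List.map_map, zero_add]
          refine congrArg₂ _ (by simp) ?_
          exact List.map_congr_left (fun p _ => by simp [Function.comp]; ring)

-- all-none lemma for pvGroup
lemma pvGroup_all_none (ls : List String) (h : ∀ l ∈ ls, pvHeaderName l = none) :
    ∀ dept buf, pvGroup (ls.map (fun x => (pvHeaderName x, x))) dept buf
      = if buf ++ ls ≠ [] then [(dept, PySem.Str.join "\n" (buf ++ ls))] else [] := by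
  induction ls with
  | nil => intro dept buf; simp [pvGroup]
  | cons x rest ih =>
      intro dept buf
      rw [List.map_cons, h x (by simp), pvGroup, ih (fun l hl => h l (by simp [hl]))]
      simp
lemma pvGroup_pre (pre : List String) (h : ∀ l ∈ pre, pvHeaderName l = none)
    (x : String) (d : String) (hx : pvHeaderName x = some d) (rs : List (Option String × String)) :
    ∀ dept buf, pvGroup ((pre.map (fun y => (pvHeaderName y, y))) ++ (pvHeaderName x, x) :: rs) dept buf
      = (if buf ++ pre ≠ [] then [(dept, PySem.Str.join "\n" (buf ++ pre))] else []) ++ pvGroup rs d [] := by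
  induction pre with
  | nil => intro dept buf; rw [hx]; simp [pvGroup]
  | cons y rest ih =>
      intro dept buf
      rw [List.map_cons, h y (by simp), List.cons_append, pvGroup,
        ih (fun l hl => h l (by simp [hl]))]
      simp

-- slicing commutes with dropping a common prefix
lemma pvSlice_shift (u rest' : List String) (a b : Int) (ha : 0 ≤ a) (hb : 0 ≤ b) :
    PySem.List.slice (u ++ rest') (some (a + u.length)) (some (b + u.length))
      = PySem.List.slice rest' (some a) (some b) := by
  rw [PySem.List.slice_toNat _ (by omega) (by omega), PySem.List.slice_toNat _ ha hb]
  have h1 : (a + (u.length : Int)).toNat = u.length + a.toNat := by omega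
  have h2 : (b + (u.length : Int)).toNat - (a + (u.length : Int)).toNat = b.toNat - a.toNat := by omega
  rw [h2, h1, List.drop_append]
  simp [List.drop_eq_nil_of_le]

lemma pvFilterMap_none (pre : List String) (h : ∀ l ∈ pre, pvHeaderName l = none) (s : Int) :
    (PySem.List.enumerate pre s).filterMap pvHdrF = [] := by
  rw [List.filterMap_eq_nil_iff]
  intro r hr
  obtain ⟨k, hk, rfl⟩ := (PySem.List.mem_enumerate_iff _ _ _).mp hr
  simp [pvHdrF, h _ (List.getElem_mem hk)]

lemma pvBcore_all_none (lines : List String) (h : ∀ l ∈ lines, pvHeaderName l = none) (dept : String) :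
    pvBcore lines dept = if lines ≠ [] then [(dept, PySem.Str.join "\n" lines)] else [] := by
  have hb : pvBounds lines dept = [((-1 : Int), dept), ((lines.length : Int), "")] := by
    simp [pvBounds, pvFilterMap_none lines h 0]
  have hsl : PySem.List.slice lines (some ((-1 : Int) + 1)) (some (lines.length : Int)) = lines := by
    have h0 : ((-1 : Int) + 1) = (((0 : Nat) : Int)) := by norm_num
    rw [h0, PySem.List.slice_natCast]; simp
  simp only [pvBcore, hb, List.tail_cons, List.zip_cons_cons, List.zip_nil_right,
    List.flatMap_cons, List.flatMap_nil, List.append_nil, pvSegOut, hsl]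

lemma pvBounds_tail_fst_lb (rest' : List String) (d : String) :
    ∀ q ∈ (pvBounds rest' d).tail, (0 : Int) ≤ q.1 := by
  intro q hq
  have hq' : q ∈ (PySem.List.enumerate rest' 0).filterMap pvHdrF ∨ q = ((rest'.length : Int), "") := by
    simpa [pvBounds] using hq
  rcases hq' with hq | rfl
  · obtain ⟨r, hr, hf⟩ := List.mem_filterMap.mp hq
    obtain ⟨k, hk, rfl⟩ := (PySem.List.mem_enumerate_iff _ _ _).mp hr
    simp only [pvHdrF, Option.map_eq_some_iff] at hf
    obtain ⟨d', _, rfl⟩ := hf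
    simp
  · simp

lemma pvBounds_fst_lb (rest' : List String) (d : String) :
    ∀ q ∈ pvBounds rest' d, (-1 : Int) ≤ q.1 := by
  intro q hq
  rcases (List.mem_cons.mp hq) with rfl | hq'
  · simp
  · exact le_trans (by norm_num) (pvBounds_tail_fst_lb rest' d q hq')

lemma pvDropWhile_cons_false {α : Type} (p : α → Bool) (l : List α) (x : α) (xs : List α)
    (h : l.dropWhile p = x :: xs) : p x = false := by
  induction l with
  | nil => simp at h
  | cons y ys ih =>
      by_cases hy : p y
      · rw [List.dropWhile_cons_of_pos hy] at h; exact ih h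
      · rw [List.dropWhile_cons_of_neg hy] at h
        injection h with h1 _
        subst h1
        simpa using hy

lemma pvFlatMap_map_congr {α β : Type} (L : List α) (F : α → α) (f g : α → List β)
    (h : ∀ x ∈ L, f (F x) = g x) : (L.map F).flatMap f = L.flatMap g := by
  induction L with
  | nil => simp
  | cons y ys ih =>
      simp only [List.map_cons, List.flatMap_cons, h y (by simp)]
      rw [ih (fun z hz => h z (by simp [hz]))]

lemma pvBcore_group : ∀ (n : Nat) (lines : List String), lines.length ≤ n → ∀ dept,
    pvBcore lines dept = pvGroup (lines.map (fun x => (pvHeaderName x, x))) dept [] := by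
  intro n
  induction n with
  | zero =>
      intro lines hlen dept
      have : lines = [] := List.length_eq_zero_iff.mp (Nat.le_zero.mp hlen)
      subst this
      rw [pvBcore_all_none [] (by simp) dept]
      simp [pvGroup]
  | succ n ih =>
      intro lines hlen dept
      set P : String → Bool := fun l => (pvHeaderName l).isNone with hP
      cases hdw : lines.dropWhile P with
      | nil =>
          have hall : ∀ l ∈ lines, pvHeaderName l = none := by
            intro l hl
            have : lines.takeWhile P = lines := by
              have := List.takeWhile_append_dropWhile (p := P) (l := lines)
              rwa [hdw, List.append_nil] at this
            have hp : P l := List.mem_takeWhile_imp (by rwa [this])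
            simpa [hP, Option.isNone_iff_eq_none] using hp
          rw [pvBcore_all_none lines hall dept, pvGroup_all_none lines hall dept []]
          simp
      | cons x rest =>
          set pre := lines.takeWhile P with hpre_def
          have hsplit : pre ++ x :: rest = lines := by
            rw [hpre_def, ← hdw]; exact List.takeWhile_append_dropWhile
          have hpre : ∀ l ∈ pre, pvHeaderName l = none := by
            intro l hl
            simpa [hP, Option.isNone_iff_eq_none] using List.mem_takeWhile_imp hl
          have hxP : P x = false := pvDropWhile_cons_false P lines x rest hdw
          obtain ⟨d, hxd⟩ : ∃ d, pvHeaderName x = some d := by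
            cases h : pvHeaderName x with
            | none =>
                exfalso
                have hT : P x = true := by simp [hP, h]
                rw [hT] at hxP
                exact Bool.noConfusion hxP
            | some d => exact ⟨d, rfl⟩
          have hhead : (PySem.List.enumerate lines 0).filterMap pvHdrF
              = (((pre.length : Int)), d) :: ((PySem.List.enumerate rest 0).filterMap pvHdrF).map
                  (fun p => (p.1 + ((pre.length : Int) + 1), p.2)) := by
            rw [← hsplit, PySem.List.enumerate_append, List.filterMap_append,
              pvFilterMap_none pre hpre 0, PySem.List.enumerate_cons, List.filterMap_cons,
              show pvHdrF (0 + (pre.length : Int), x) = some (0 + (pre.length : Int), d) from by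
                simp [pvHdrF, hxd],
              pvFilterMap_enum_shift]
            simp
          have hlen2 : ((lines.length : Int)) = (rest.length : Int) + ((pre.length : Int) + 1) := by
            rw [← hsplit]; push_cast [List.length_append, List.length_cons]; ring
          have hbounds : pvBounds lines dept
              = ((-1 : Int), dept) :: (pvBounds rest d).map
                  (fun p => (p.1 + ((pre.length : Int) + 1), p.2)) := by
            simp only [pvBounds, hhead, List.map_cons, List.map_append, List.map_cons, List.map_nil]
            rw [hlen2]
            norm_num
          have hBcons : pvBounds rest d = ((-1 : Int), d) :: (pvBounds rest d).tail := rfl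
          have hzip : (pvBounds lines dept).zip (pvBounds lines dept).tail
              = ((((-1 : Int), dept)), ((-1 : Int) + ((pre.length : Int) + 1), d)) ::
                ((pvBounds rest d).zip (pvBounds rest d).tail).map
                  (Prod.map (fun p => (p.1 + ((pre.length : Int) + 1), p.2))
                            (fun p => (p.1 + ((pre.length : Int) + 1), p.2))) := by
            have hmap : ((-1 : Int) + ((pre.length : Int) + 1), d) ::
                ((pvBounds rest d).tail).map (fun p => (p.1 + ((pre.length : Int) + 1), p.2))
                = (pvBounds rest d).map (fun p => (p.1 + ((pre.length : Int) + 1), p.2)) := by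
              conv_rhs => rw [hBcons]
              simp
            conv_lhs => rw [hbounds, hBcons]
            rw [List.map_cons, List.tail_cons, List.zip_cons_cons, hmap, List.zip_map]
          have hlines_split : lines = (pre ++ [x]) ++ rest := by rw [← hsplit]; simp
          have hseg : ∀ q ∈ (pvBounds rest d).zip (pvBounds rest d).tail,
              pvSegOut lines (Prod.map (fun p => (p.1 + ((pre.length : Int) + 1), p.2))
                                       (fun p => (p.1 + ((pre.length : Int) + 1), p.2)) q)
                = pvSegOut rest q := by
            intro q hq
            obtain ⟨hq1, hq2⟩ := List.of_mem_zip (show (q.1, q.2) ∈ _ from by simpa using hq)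
            have h1 : (-1 : Int) ≤ q.1.1 := pvBounds_fst_lb rest d _ hq1
            have h2 : (0 : Int) ≤ q.2.1 := pvBounds_tail_fst_lb rest d _ hq2
            have hm : (((pre ++ [x]).length : Int)) = (pre.length : Int) + 1 := by
              push_cast [List.length_append, List.length_cons, List.length_nil]; ring
            have e1 : q.1.1 + ((pre.length : Int) + 1) + 1 = (q.1.1 + 1) + (((pre ++ [x]).length : Int)) := by
              rw [hm]; ring
            have e2 : q.2.1 + ((pre.length : Int) + 1) = q.2.1 + (((pre ++ [x]).length : Int)) := by
              rw [hm]
            simp only [pvSegOut, Prod.map, hlines_split, e1, e2,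
              pvSlice_shift (pre ++ [x]) rest (q.1.1 + 1) q.2.1 (by omega) h2]
          have hfirst : pvSegOut lines (((-1 : Int), dept), ((-1 : Int) + ((pre.length : Int) + 1), d))
              = if pre ≠ [] then [(dept, PySem.Str.join "\n" pre)] else [] := by
            have h0 : ((-1 : Int) + 1) = (((0 : Nat) : Int)) := by norm_num
            have hk : ((-1 : Int) + ((pre.length : Int) + 1)) = ((pre.length : Nat) : Int) := by
              ring
            have htake : List.take pre.length lines = pre := by
              rw [← List.takeWhile_append_dropWhile (p := P) (l := lines)]
              exact List.take_left' rfl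
            simp only [pvSegOut, h0, hk, PySem.List.slice_natCast]
            simp [htake]
          have hrest_len : rest.length ≤ n := by
            have : lines.length = pre.length + rest.length + 1 := by
              rw [← hsplit]; simp [List.length_append]; omega
            omega
          rw [pvBcore, hzip, List.flatMap_cons,
            pvFlatMap_map_congr _ _ _ (pvSegOut rest) hseg, hfirst, ← pvBcore,
            ih rest hrest_len d, ← hsplit, List.map_append, List.map_cons,
            pvGroup_pre pre hpre x d hxd _ dept []]
          simp

-- ===== VERDICT (by name: the statement is the Claim_ definition above) =====
theorem chunk_by_department_spec : Claim_equal_chunk_by_department := by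
  intro text _
  show chunk_by_department text = chunk_by_department_alt text
  rw [pvAlt_eq_Bcore,
    pvBcore_group ((PySem.Str.split? text "\n").getD []).length _ le_rfl "Unknown"]
  simpa [chunk_by_department, pvFinal] using
    pvFold_group ((PySem.Str.split? text "\n").getD []) [] "Unknown" []
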